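-- pv_equiv track=rewrite | github.com/P-oong/REB_green-remodeling-project | 01_matching_energy_buildings/old2_src/06_batch_stage_EBD_BD_matching.py | find_unique_matches
-- ===== SOURCE A (Python) =====
-- from collections import defaultdict
--
-- def find_unique_matches(possible_matches):
--     """
--     유일한 매칭만 찾아서 반환
--     - EBD가 하나의 BD에만 매칭되고
--     - BD가 하나의 EBD에만 매칭되는 경우만 선택
--     """
--     ebd_to_bds = defaultdict(list)  # 각 EBD가 매칭 가능한 BD 목록
--     bd_to_ebds = defaultdict(list)  # 각 BD가 매칭 가능한 EBD 목록
--
--     # 매칭 가능성 수집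
--     for ebd_idx, bd_pk in possible_matches:
--         ebd_to_bds[ebd_idx].append(bd_pk)
--         bd_to_ebds[bd_pk].append(ebd_idx)
--
--     # 유일한 매칭만 선택
--     confirmed = []
--     for ebd_idx, bd_list in ebd_to_bds.items():
--         if len(bd_list) == 1:  # EBD가 하나의 BD에만 매칭 가능
--             bd_pk = bd_list[0]
--             if len(bd_to_ebds[bd_pk]) == 1:  # 그 BD도 하나의 EBD에만 매칭 가능
--                 confirmed.append((ebd_idx, bd_pk))
--
--     return confirmed
-- ===== SOURCE B (Python) =====
-- def find_unique_matches(possible_matches):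
--     # Brute-force conflict search: a pair is confirmed iff no OTHER pair
--     # shares its ebd_idx or its bd_pk.  No dictionaries or counting at all.
--     result = []
--     before = []
--     after = list(possible_matches)
--     while after:
--         (e, b) = after[0]
--         rest = after[1:]
--         if all(x != e and y != b for (x, y) in before + rest):
--             result.append((e, b))
--         before = before + [(e, b)]
--         after = rest
--     return result
-- ===== Notes on version B (the rewrite author's own statement) =====
-- stated objective: alternative
-- what changed: Replaces A's two adjacency-list defaultdicts and dict iteration by a dictionary-free brute-force conflict scan: walking the list with a before/after split, a pair is confirmed iff no other pair (in before + rest) shares its ebd_idx or bd_pk.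
import Mathlib
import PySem

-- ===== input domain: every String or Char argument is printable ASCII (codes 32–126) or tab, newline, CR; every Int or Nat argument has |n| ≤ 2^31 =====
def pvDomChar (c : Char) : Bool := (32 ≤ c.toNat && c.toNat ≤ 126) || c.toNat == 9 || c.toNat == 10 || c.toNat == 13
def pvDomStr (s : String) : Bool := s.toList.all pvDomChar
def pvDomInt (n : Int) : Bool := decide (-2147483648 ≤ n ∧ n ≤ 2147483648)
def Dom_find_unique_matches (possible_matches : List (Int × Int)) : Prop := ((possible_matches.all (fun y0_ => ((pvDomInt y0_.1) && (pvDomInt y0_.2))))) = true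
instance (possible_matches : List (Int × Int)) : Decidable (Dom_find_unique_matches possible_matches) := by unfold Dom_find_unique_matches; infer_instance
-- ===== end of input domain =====

-- B replaces A's two adjacency-list dicts and dict iteration by a dictionary-free
-- brute-force conflict scan (before/after split); objective: alternative, not faster.

-- ===== PORT A =====
def find_unique_matches (possible_matches : List (Int × Int)) : List (Int × Int) :=
  let ebd_to_bds := possible_matches.foldl
    (fun d p => d.modify p.1 [] (fun l => l ++ [p.2])) PySem.Dict.empty
  let bd_to_ebds := possible_matches.foldl
    (fun d p => d.modify p.2 [] (fun l => l ++ [p.1])) PySem.Dict.empty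
  ebd_to_bds.items.foldl
    (fun confirmed kv =>
      if kv.2.length == 1 then
        -- bd_list[0]; total here because it is guarded by len(bd_list) == 1
        let bd_pk := kv.2.headI
        if (bd_to_ebds.getD bd_pk []).length == 1 then confirmed ++ [(kv.1, bd_pk)]
        else confirmed
      else confirmed) []

-- ===== PORT B =====
-- the while loop of Source B: state (result, before, after)
def fum_go (result before after : List (Int × Int)) : List (Int × Int) :=
  match after with
  | [] => result
  | (e, b) :: rest =>
      if (before ++ rest).all (fun q => q.1 != e && q.2 != b) then
        fum_go (result ++ [(e, b)]) (before ++ [(e, b)]) rest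
      else
        fum_go result (before ++ [(e, b)]) rest

def find_unique_matches_alt (possible_matches : List (Int × Int)) : List (Int × Int) :=
  fum_go [] [] possible_matches

-- ===== PRECONDITION & SPEC =====
def Spec_find_unique_matches (possible_matches : List (Int × Int)) (out : List (Int × Int)) : Prop := out = find_unique_matches_alt possible_matches
instance (possible_matches : List (Int × Int)) (out : List (Int × Int)) : Decidable (Spec_find_unique_matches possible_matches out) := by unfold Spec_find_unique_matches; infer_instance

-- ===== CLAIM (what is proved, stated in full; the proofs are below) =====
def Claim_equal_find_unique_matches : Prop := ∀ (possible_matches : List (Int × Int)), Dom_find_unique_matches possible_matches → Spec_find_unique_matches possible_matches (find_unique_matches possible_matches)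

-- ===== LEMMAS AND PROOFS =====

-- B's loop computes the count-characterised filter (invariant: before ++ after = L)
theorem fum_go_eq (L : List (Int × Int)) (result before after : List (Int × Int))
    (h : before ++ after = L) :
    fum_go result before after
      = result ++ after.filter (fun p =>
          (L.countP (fun r => r.1 == p.1) == 1) && (L.countP (fun r => r.2 == p.2) == 1)) := by
  induction after generalizing result before with
  | nil => simp [fum_go]
  | cons hd rest ih =>
    obtain ⟨e, b⟩ := hd
    have h' : (before ++ [(e, b)]) ++ rest = L := by simpa using h
    have hkeep : ((before ++ rest).all (fun q => q.1 != e && q.2 != b))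
        = ((L.countP (fun r => r.1 == e) == 1) && (L.countP (fun r => r.2 == b) == 1)) := by
      have hc1 : L.countP (fun r => r.1 == e)
          = before.countP (fun r => r.1 == e) + 1 + rest.countP (fun r => r.1 == e) := by
        subst h; simp [List.countP_append]; omega
      have hc2 : L.countP (fun r => r.2 == b)
          = before.countP (fun r => r.2 == b) + 1 + rest.countP (fun r => r.2 == b) := by
        subst h; simp [List.countP_append]; omega
      by_cases hall : ((before ++ rest).all (fun q => q.1 != e && q.2 != b)) = true
      · have hallP : ∀ a ∈ before ++ rest, ¬ a.1 = e ∧ ¬ a.2 = b := by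
          intro a ha
          have := List.all_eq_true.mp hall a ha
          simpa using this
        have z1 : before.countP (fun r => r.1 == e) = 0 := by
          rw [List.countP_eq_zero]; intro a ha
          simpa using (hallP a (List.mem_append.mpr (Or.inl ha))).1
        have z1' : rest.countP (fun r => r.1 == e) = 0 := by
          rw [List.countP_eq_zero]; intro a ha
          simpa using (hallP a (List.mem_append.mpr (Or.inr ha))).1
        have z2 : before.countP (fun r => r.2 == b) = 0 := by
          rw [List.countP_eq_zero]; intro a ha
          simpa using (hallP a (List.mem_append.mpr (Or.inl ha))).2
        have z2' : rest.countP (fun r => r.2 == b) = 0 := by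
          rw [List.countP_eq_zero]; intro a ha
          simpa using (hallP a (List.mem_append.mpr (Or.inr ha))).2
        rw [hall]
        simp [hc1, hc2, z1, z1', z2, z2']
      · obtain ⟨a, ha, hbad⟩ : ∃ a ∈ before ++ rest, (a.1 = e ∨ a.2 = b) := by
          by_contra hno
          apply hall
          rw [List.all_eq_true]
          intro q hq
          have hq' : ¬ (q.1 = e ∨ q.2 = b) := fun hor => hno ⟨q, hq, hor⟩
          rw [not_or] at hq'
          simp [hq'.1, hq'.2]
        have hne : ¬ (((L.countP (fun r => r.1 == e) == 1)
            && (L.countP (fun r => r.2 == b) == 1)) = true) := by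
          simp only [Bool.and_eq_true, beq_iff_eq]
          rintro ⟨k1, k2⟩
          rcases hbad with he | hb
          · have hp1 : 0 < (before ++ rest).countP (fun r => r.1 == e) :=
              List.countP_pos_iff.mpr ⟨a, ha, by simp [he]⟩
            rw [List.countP_append] at hp1; omega
          · have hp2 : 0 < (before ++ rest).countP (fun r => r.2 == b) :=
              List.countP_pos_iff.mpr ⟨a, ha, by simp [hb]⟩
            rw [List.countP_append] at hp2; omega
        rw [Bool.not_eq_true] at hall hne
        rw [hall, hne]
    simp only [fum_go]
    rw [hkeep]
    by_cases hc : (((L.countP (fun r => r.1 == e) == 1)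
        && (L.countP (fun r => r.2 == b) == 1)) = true)
    · rw [if_pos hc, ih _ _ h']
      simp [hc]
    · rw [if_neg hc, ih _ _ h']
      rw [Bool.not_eq_true] at hc
      simp [hc]

theorem filter_foldl_set_add {α : Type} [DecidableEq α] (ys : List α) (s : List α)
    (u : α → Bool) (h : ∀ x, u x = true → (s ++ ys).count x ≤ 1) :
    (ys.foldl PySem.Set.add s).filter u = (s ++ ys).filter u := by
  induction ys generalizing s with
  | nil => simp
  | cons y t ih =>
    simp only [List.foldl_cons]
    by_cases hy : y ∈ s
    · have hadd : PySem.Set.add s y = s := by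
        simp [PySem.Set.add, PySem.Set.contains, hy]
      rw [hadd, ih s]
      · by_cases huy : u y = true
        · have hcnt := h y huy
          have hpos : 0 < s.count y := List.count_pos_iff.mpr hy
          simp [List.count_append, List.count_cons_self] at hcnt
          omega
        · simp [List.filter_append, huy]
      · intro x hx
        have := h x hx
        simp [List.count_append, List.count_cons] at this ⊢
        omega
    · have hadd : PySem.Set.add s y = s ++ [y] := by
        simp [PySem.Set.add, PySem.Set.contains, hy]
      rw [hadd, ih (s ++ [y])]
      · simp
      · intro x hx; have := h x hx
        simp [List.count_append, List.count_cons] at this ⊢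
        omega

theorem getD_snd_group (L : List (Int × Int)) (b : Int) :
    (L.foldl (fun d p => d.modify p.2 [] (fun l => l ++ [p.1]))
        PySem.Dict.empty).getD b []
    = (L.filter (fun p => p.2 == b)).map (·.1) := by
  rw [show (L.foldl (fun d p => d.modify p.2 [] (fun l => l ++ [p.1])) PySem.Dict.empty)
      = ((L.map Prod.swap).foldl (fun d p => d.modify p.1 [] (fun l => l ++ [p.2]))
          PySem.Dict.empty) from by rw [List.foldl_map]; rfl]
  rw [PySem.Dict.getD_foldl_modify_append]
  simp [List.filter_map, List.map_map, Function.comp_def, Prod.swap]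

theorem find_unique_matches_spec : Claim_equal_find_unique_matches := by
  intro L _
  show find_unique_matches L = find_unique_matches_alt L
  unfold find_unique_matches find_unique_matches_alt
  rw [fum_go_eq L [] [] L rfl, List.nil_append]
  dsimp only
  -- merge the nested ifs of A's loop body
  rw [show (fun (confirmed : List (Int × Int)) (kv : Int × List Int) =>
      if kv.2.length == 1 then
        if ((L.foldl (fun d p => d.modify p.2 [] (fun l => l ++ [p.1]))
              PySem.Dict.empty).getD kv.2.headI []).length == 1 then
          confirmed ++ [(kv.1, kv.2.headI)]
        else confirmed
      else confirmed)
    = (fun confirmed kv =>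
      if (kv.2.length == 1 &&
          (((L.foldl (fun d p => d.modify p.2 [] (fun l => l ++ [p.1]))
              PySem.Dict.empty).getD kv.2.headI []).length == 1)) then
        confirmed ++ [(kv.1, kv.2.headI)]
      else confirmed) from by
        funext c kv; by_cases h1 : kv.2.length == 1 <;> simp [h1]]
  rw [PySem.List.foldl_append_if]
  have hnd : ((L.foldl (fun d p => d.modify p.1 [] (fun l => l ++ [p.2]))
      PySem.Dict.empty).keys).Nodup :=
    PySem.Dict.nodup_keys_foldl_modify_key L Prod.fst [] (fun _ p l => l ++ [p.2]) _
      (by simp)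
  rw [PySem.Dict.items_eq_map_keys _ hnd []]
  rw [PySem.Dict.keys_foldl_modify_key]
  simp only [List.nil_append, PySem.Dict.keys_empty, getD_snd_group,
    PySem.Dict.getD_foldl_modify_append, PySem.Dict.getD_empty,
    List.filter_map, List.map_map]
  rw [show PySem.Set.update ([] : List Int) (L.map Prod.fst)
      = (L.map Prod.fst).foldl PySem.Set.add [] from rfl]
  have hcount : ∀ x : Int,
      ((fun kv : Int × List Int =>
          kv.2.length == 1 &&
            (List.map (fun x => x.1) (List.filter (fun p => p.2 == kv.2.headI) L)).length == 1) ∘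
        fun k => (k, List.map (fun x => x.2) (List.filter (fun p => p.1 == k) L))) x = true →
      (([] : List Int) ++ L.map Prod.fst).count x ≤ 1 := by
    intro x hx
    simp only [Function.comp_apply, Bool.and_eq_true, beq_iff_eq, List.length_map] at hx
    have h1 : L.countP (fun p => p.1 == x) = 1 := by
      have := hx.1
      rw [← List.countP_eq_length_filter] at this
      simpa using this
    rw [List.nil_append, List.count, List.countP_map]
    exact le_of_eq h1
  rw [filter_foldl_set_add _ [] _ hcount]
  rw [List.nil_append, List.filter_map, List.map_map]
  have huniq : ∀ p ∈ L, L.countP (fun r => r.1 == p.1) = 1 →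
      L.filter (fun r => r.1 == p.1) = [p] := by
    intro p hp h1
    have hmem : p ∈ L.filter (fun r => r.1 == p.1) := List.mem_filter.mpr ⟨hp, by simp⟩
    have hlen : (L.filter (fun r => r.1 == p.1)).length = 1 := by
      rw [← List.countP_eq_length_filter]; exact h1
    obtain ⟨a, ha⟩ := List.length_eq_one_iff.mp hlen
    rw [ha] at hmem ⊢
    simp at hmem
    rw [hmem]
  have hP : ∀ p : Int × Int, p ∈ L →
      ((((fun kv : Int × List Int =>
          kv.2.length == 1 &&
            (List.map (fun x => x.1) (List.filter (fun r => r.2 == kv.2.headI) L)).length == 1) ∘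
        fun k => (k, List.map (fun x => x.2) (List.filter (fun r => r.1 == k) L))) ∘ Prod.fst) p)
      = (((L.countP (fun r => r.1 == p.1) == 1) &&
          (L.countP (fun r => r.2 == p.2) == 1)) : Bool) := by
    intro p hp
    simp only [Function.comp_apply, List.length_map, ← List.countP_eq_length_filter]
    by_cases h1 : L.countP (fun r => r.1 == p.1) = 1
    · rw [huniq p hp h1]
      simp [h1]
    · have hne : (List.countP (fun r : Int × Int => r.1 == p.1) L == 1) = false := by
        simp [h1]
      rw [hne]
      simp
  rw [List.filter_congr hP]
  conv_rhs => rw [← List.map_id (List.filter _ L)]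
  apply List.map_congr_left
  intro p hp'
  obtain ⟨hpL, hpP⟩ := List.mem_filter.mp hp'
  obtain ⟨hc1, _⟩ := Bool.and_eq_true_iff.mp hpP
  have h1 : L.countP (fun r => r.1 == p.1) = 1 := by simpa using hc1
  simp [Function.comp, huniq p hpL h1]
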